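-- pv_equiv track=rewrite | github.com/FireF4ng/Inf101_Project_-Le-Scrabble | scrabble.py | meilleur_mot
-- ===== SOURCE A (Python) =====
-- JOKER = '?'  # jeton joker
--
-- def mot_jouable(mot, ll):
--     """Q15) Vérifie si le mot peut être formé avec les lettres de la liste ll."""
--
--     liste_temp = list(ll)
--     for lettre in mot:
--
--         if lettre in liste_temp:
--             liste_temp.remove(lettre)
--
--         elif JOKER in liste_temp:
--             liste_temp.remove(JOKER)
--
--         else:
--             return False
--
--     return True
--
-- def mots_jouables(motsfr, ll, extra_lett=None):
--     """Q16) Sélectionne les mots de motsfr pouvant être formés avec les lettres de la liste ll."""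
--
--     if extra_lett is None:
--         extra_lett = []
--
--     pool = list(ll) + list(extra_lett)
--     playable = []
--
--     max_len = len(pool)
--
--     for mot in motsfr:
--
--         if len(mot) <= max_len:
--
--             if mot_jouable(mot, pool):
--                 playable.append(mot)
--
--     return playable
--
-- def valeur_mot(mot, dico):
--     """Q22) Calcule la valeur du mot selon le dictionnaire dico."""
--
--     valeur = 0
--
--     for lettre in mot:
--         valeur += dico[lettre]['val']
--
--     if len(mot) == 7:
--         valeur += 50
--
--     return valeur
--
-- def meilleur_mot(motsfr, ll, dico, extra_lett=None):
--     """Q23) Trouve le mot de plus haute valeur jouable avec les lettres de la liste ll."""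
--
--     candidats = mots_jouables(motsfr, ll, extra_lett)
--
--     if not candidats:
--         return ""
--
--     best = candidats[0]
--     best_score = valeur_mot(best, dico)
--
--     for mot in candidats[1:]:
--         s = valeur_mot(mot, dico)
--
--         if s > best_score:
--             best = mot
--             best_score = s
--
--     return best
-- ===== SOURCE B (Python) =====
-- JOKER = '?'
--
-- def meilleur_mot(motsfr, ll, dico, extra_lett=None):
--     """Single fused pass: Counter-based playability test (per-letter deficits vs
--     jokers) and running argmax, never building the intermediate playable list."""
--     from collections import Counter
--     pool = Counter(ll)
--     if extra_lett is not None: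
--         pool.update(extra_lett)
--     jokers = pool[JOKER]
--     best = ""
--     best_score = None
--     for mot in motsfr:
--         need = Counter(mot)
--         deficit = need[JOKER] + sum(max(n - pool[c], 0)
--                                     for c, n in need.items() if c != JOKER)
--         if deficit <= jokers:
--             s = sum(dico[c]['val'] for c in mot)
--             if len(mot) == 7:
--                 s += 50
--             if best_score is None or s > best_score:
--                 best, best_score = mot, s
--     return best
-- ===== Notes on version B (the rewrite author's own statement) =====
-- stated objective: faster
-- what changed: B is a single fused pass over motsfr (no intermediate playable list, no candidats[1:] scan) that tests playability by summing per-letter Counter deficits against the jokers of a precomputed pool Counter instead of A's greedy tile-removal with repeated 'in'/list.remove scans over a fresh pool copy per word.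
import Mathlib
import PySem

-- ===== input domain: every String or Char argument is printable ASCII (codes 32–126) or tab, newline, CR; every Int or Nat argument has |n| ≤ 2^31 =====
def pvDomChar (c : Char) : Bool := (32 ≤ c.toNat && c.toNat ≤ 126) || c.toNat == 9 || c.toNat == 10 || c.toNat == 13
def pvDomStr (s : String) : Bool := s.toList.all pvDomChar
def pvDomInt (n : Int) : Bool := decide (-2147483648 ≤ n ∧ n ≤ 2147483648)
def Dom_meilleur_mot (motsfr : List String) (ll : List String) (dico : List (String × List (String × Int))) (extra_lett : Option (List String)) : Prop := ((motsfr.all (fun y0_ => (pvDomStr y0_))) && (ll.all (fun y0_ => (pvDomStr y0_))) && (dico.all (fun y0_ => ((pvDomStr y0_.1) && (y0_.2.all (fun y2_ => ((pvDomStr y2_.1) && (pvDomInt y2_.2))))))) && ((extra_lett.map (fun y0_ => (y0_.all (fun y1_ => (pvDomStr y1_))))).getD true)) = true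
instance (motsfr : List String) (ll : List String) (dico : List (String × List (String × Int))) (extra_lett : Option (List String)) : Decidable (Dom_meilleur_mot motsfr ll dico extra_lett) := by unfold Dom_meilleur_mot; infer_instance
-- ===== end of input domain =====

-- B fuses the playability test and the argmax into one pass (no intermediate playable
-- list) and tests playability by counting per-letter deficits against the jokers instead
-- of A's greedy tile-removal (pool counted once, no per-word pool copies/scans);
-- objective: faster (measured), same exact result.

-- ===== PORT A =====
-- A's mot_jouable: greedy removal from a working copy of the letter list.
def pvA_jouable_go : List Char → List String → Bool
  | [], _ => true
  | c :: rest, temp =>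
    let lettre := String.singleton c
    if lettre ∈ temp then
      pvA_jouable_go rest ((PySem.List.remove? temp lettre).getD temp)
    else if "?" ∈ temp then
      pvA_jouable_go rest ((PySem.List.remove? temp "?").getD temp)
    else false

def pvA_mot_jouable (mot : String) (ll : List String) : Bool :=
  pvA_jouable_go mot.toList ll

def pvA_mots_jouables (motsfr : List String) (ll : List String)
    (extra_lett : Option (List String)) : List String :=
  let extra := match extra_lett with | none => [] | some e => e
  let pool := ll ++ extra
  let max_len := pool.length
  motsfr.foldl (fun playable mot =>
    if PySem.Str.len mot ≤ (max_len : Int) then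
      if pvA_mot_jouable mot pool then playable ++ [mot] else playable
    else playable) []

-- dico[lettre]['val']: a missing key is a KeyError in Python — excluded by Pre_; getD 0 here.
def pvA_valeur_mot (mot : String) (dico : List (String × List (String × Int))) : Int :=
  let valeur := mot.toList.foldl (fun valeur lettre =>
    valeur + ((((dico.lookup (String.singleton lettre)).getD []).lookup "val").getD 0)) 0
  if PySem.Str.len mot = 7 then valeur + 50 else valeur

def meilleur_mot (motsfr : List String) (ll : List String) (dico : List (String × List (String × Int))) (extra_lett : Option (List String)) : String :=
  let candidats := pvA_mots_jouables motsfr ll extra_lett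
  match candidats with
  | [] => ""
  | best :: rest =>
    (rest.foldl (fun bs mot =>
        let s := pvA_valeur_mot mot dico
        if s > bs.2 then (mot, s) else bs)
      (best, pvA_valeur_mot best dico)).1

-- ===== PORT B =====
-- B's playability: jokers needed = need['?'] + Σ over distinct other letters of
-- max(need-have, 0) (Nat subtraction IS that max); Counter key order = first
-- occurrences = PySem.List.dedup.
def pvB_deficit (mot : String) (pool : List String) : Nat :=
  let need := mot.toList.map String.singleton
  need.count "?" +
    (((PySem.List.dedup need).filter (fun c => c ≠ "?")).map
      (fun c => need.count c - pool.count c)).sum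

def pvB_valeur (mot : String) (dico : List (String × List (String × Int))) : Int :=
  (mot.toList.map (fun c => (((dico.lookup (String.singleton c)).getD []).lookup "val").getD 0)).sum
  + (if PySem.Str.len mot = 7 then 50 else 0)

def meilleur_mot_alt (motsfr : List String) (ll : List String) (dico : List (String × List (String × Int))) (extra_lett : Option (List String)) : String :=
  let pool := ll ++ (match extra_lett with | none => [] | some e => e)
  let jokers := pool.count "?"
  (motsfr.foldl (fun st mot =>
      if pvB_deficit mot pool ≤ jokers then
        let s := pvB_valeur mot dico
        match st.2 with
        | none => (mot, some s)
        | some b => if s > b then (mot, some s) else st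
      else st)
    (("", (none : Option Int)))).1

-- ===== PRECONDITION & SPEC =====
-- pvSD: mathematical count of the jokers a word needs from a pool (used by Pre_ and the lemmas only).
def pvSD (s p : List String) : Nat :=
  s.count "?" + ∑ x ∈ s.toFinset.erase "?", (s.count x - p.count x)

-- Pre_ excludes exactly the inputs where the Python A raises a KeyError: some playable
-- word contains a letter without a dico entry carrying a "val" key.
def Pre_meilleur_mot (motsfr : List String) (ll : List String) (dico : List (String × List (String × Int))) (extra_lett : Option (List String)) : Prop :=
  let pool := ll ++ (match extra_lett with | none => [] | some e => e)
  ∀ mot ∈ motsfr, pvSD (mot.toList.map String.singleton) pool ≤ pool.count "?" →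
    ∀ c ∈ mot.toList, (((dico.lookup (String.singleton c)).getD []).lookup "val").isSome
instance (motsfr : List String) (ll : List String) (dico : List (String × List (String × Int))) (extra_lett : Option (List String)) : Decidable (Pre_meilleur_mot motsfr ll dico extra_lett) := by unfold Pre_meilleur_mot; infer_instance

def pvWitness_meilleur_mot : List String × List String × (List (String × List (String × Int))) × Option (List String) :=
  ([], ["a", "b", "?"], [("a", [("val", 1)]), ("b", [("val", 3)])], none)

def Spec_meilleur_mot (motsfr : List String) (ll : List String) (dico : List (String × List (String × Int))) (extra_lett : Option (List String)) (out : String) : Prop := out = meilleur_mot_alt motsfr ll dico extra_lett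
instance (motsfr : List String) (ll : List String) (dico : List (String × List (String × Int))) (extra_lett : Option (List String)) (out : String) : Decidable (Spec_meilleur_mot motsfr ll dico extra_lett out) := by unfold Spec_meilleur_mot; infer_instance

-- ===== CLAIM (what is proved, stated in full; the proofs are below) =====
def Claim_equal_meilleur_mot : Prop := ∀ (motsfr : List String) (ll : List String) (dico : List (String × List (String × Int))) (extra_lett : Option (List String)), Dom_meilleur_mot motsfr ll dico extra_lett → Pre_meilleur_mot motsfr ll dico extra_lett → Spec_meilleur_mot motsfr ll dico extra_lett (meilleur_mot motsfr ll dico extra_lett)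

-- ===== LEMMAS AND PROOFS =====

-- counting any finite set of distinct keys covers at most the whole list
lemma pvCountSum_le (t : Finset String) (p : List String) : ∑ x ∈ t, p.count x ≤ p.length := by
  induction p with
  | nil => simp
  | cons a p ih =>
    have h1 : ∑ x ∈ t, (a :: p).count x
        = (∑ x ∈ t, p.count x) + ∑ x ∈ t, (if a = x then 1 else 0) := by
      rw [← Finset.sum_add_distrib]
      refine Finset.sum_congr rfl (fun x _ => ?_)
      rw [List.count_cons]
      simp only [beq_iff_eq]
    have h2 : ∑ x ∈ t, (if a = x then 1 else 0) ≤ 1 := by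
      rw [Finset.sum_ite_eq t a (fun _ => 1)]
      split <;> omega
    simp only [List.length_cons]
    omega

-- the deficit sum may be indexed by any superset of the word's letters
lemma pvSum_indep (s p : List String) (t : Finset String) (h : ∀ x ∈ s, x ∈ t) :
    ∑ x ∈ t.erase "?", (s.count x - p.count x)
      = ∑ x ∈ s.toFinset.erase "?", (s.count x - p.count x) := by
  refine (Finset.sum_subset ?_ ?_).symm
  · exact Finset.erase_subset_erase _ (fun x hx => h x (List.mem_toFinset.mp hx))
  · intro x hx hnx
    have hxs : x ∉ s := by
      intro hxs
      exact hnx (Finset.mem_erase.mpr ⟨(Finset.mem_erase.mp hx).1, List.mem_toFinset.mpr hxs⟩)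
    simp [List.count_eq_zero_of_not_mem hxs]

-- helper: counting a different letter ignores the head
lemma pvCount_cons_ne {x l : String} (s' : List String) (h : l ≠ x) :
    (l :: s').count x = s'.count x := by
  simp [h]

-- one unfolding step of A's greedy loop
lemma pvA_go_cons (c : Char) (r : List Char) (p : List String) :
    pvA_jouable_go (c :: r) p =
      (if String.singleton c ∈ p then
        pvA_jouable_go r ((PySem.List.remove? p (String.singleton c)).getD p)
      else if "?" ∈ p then
        pvA_jouable_go r ((PySem.List.remove? p "?").getD p)
      else false) := rfl

-- A's greedy test succeeds iff the needed jokers are available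
lemma pvGreedy_iff (m : List Char) : ∀ (p : List String),
    pvA_jouable_go m p = true ↔ pvSD (m.map String.singleton) p ≤ p.count "?" := by
  induction m with
  | nil => intro p; simp [pvA_jouable_go, pvSD]
  | cons c r ih =>
    intro p
    rw [pvA_go_cons, List.map_cons]
    generalize String.singleton c = l
    by_cases hmem : l ∈ p
    · rw [if_pos hmem]
      have hrm : (PySem.List.remove? p l).getD p = p.erase l := by
        rw [PySem.List.remove?_eq_some_erase p l hmem]; rfl
      rw [hrm, ih (p.erase l)]
      unfold pvSD
      rw [List.toFinset_cons]
      rw [← pvSum_indep (r.map String.singleton) (p.erase l)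
            (insert l (r.map String.singleton).toFinset)
            (fun x hx => Finset.mem_insert_of_mem (List.mem_toFinset.mpr hx))]
      by_cases hql : l = "?"
      · subst hql
        have hsum : ∑ x ∈ (insert "?" (r.map String.singleton).toFinset).erase "?",
              ((("?" :: r.map String.singleton).count x : ℕ) - p.count x)
            = ∑ x ∈ (insert "?" (r.map String.singleton).toFinset).erase "?",
              ((r.map String.singleton).count x - (p.erase "?").count x) := by
          refine Finset.sum_congr rfl (fun x hx => ?_)
          have hx' : x ≠ "?" := (Finset.mem_erase.mp hx).1
          rw [pvCount_cons_ne _ (Ne.symm hx'), List.count_erase_of_ne hx']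
        have hc1 : ("?" :: r.map String.singleton).count "?"
            = (r.map String.singleton).count "?" + 1 := List.count_cons_self
        have hc2 : (p.erase "?").count "?" = p.count "?" - 1 := List.count_erase_self
        have hc3 : 1 ≤ p.count "?" := List.count_pos_iff.mpr hmem
        rw [hsum, hc1, hc2]
        omega
      · have hlt : l ∈ (insert l (r.map String.singleton).toFinset).erase "?" :=
          Finset.mem_erase.mpr ⟨hql, Finset.mem_insert_self _ _⟩
        have hpeel1 := (Finset.add_sum_erase _
          (fun x => (((l :: r.map String.singleton).count x : ℕ) - p.count x)) hlt).symm
        have hpeel2 := (Finset.add_sum_erase _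
          (fun x => (((r.map String.singleton).count x : ℕ) - (p.erase l).count x)) hlt).symm
        have hrest : ∑ x ∈ ((insert l (r.map String.singleton).toFinset).erase "?").erase l,
              (((l :: r.map String.singleton).count x : ℕ) - p.count x)
            = ∑ x ∈ ((insert l (r.map String.singleton).toFinset).erase "?").erase l,
              ((r.map String.singleton).count x - (p.erase l).count x) := by
          refine Finset.sum_congr rfl (fun x hx => ?_)
          have hxl : x ≠ l := (Finset.mem_erase.mp hx).1
          rw [pvCount_cons_ne _ (Ne.symm hxl), List.count_erase_of_ne hxl]
        have hc1 : (l :: r.map String.singleton).count l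
            = (r.map String.singleton).count l + 1 := List.count_cons_self
        have hc2 : (p.erase l).count l = p.count l - 1 := List.count_erase_self
        have hc3 : 1 ≤ p.count l := List.count_pos_iff.mpr hmem
        have hc4 : (l :: r.map String.singleton).count "?"
            = (r.map String.singleton).count "?" := pvCount_cons_ne _ hql
        have hc5 : (p.erase l).count "?" = p.count "?" :=
          List.count_erase_of_ne (fun h => hql h.symm)
        rw [hpeel1, hpeel2, hrest, hc1, hc2, hc4, hc5]
        omega
    · by_cases hj : "?" ∈ p
      · have hql : l ≠ "?" := fun h => hmem (h ▸ hj)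
        rw [if_neg hmem, if_pos hj]
        have hrm : (PySem.List.remove? p "?").getD p = p.erase "?" := by
          rw [PySem.List.remove?_eq_some_erase p "?" hj]; rfl
        rw [hrm, ih (p.erase "?")]
        unfold pvSD
        rw [List.toFinset_cons]
        rw [← pvSum_indep (r.map String.singleton) (p.erase "?")
              (insert l (r.map String.singleton).toFinset)
              (fun x hx => Finset.mem_insert_of_mem (List.mem_toFinset.mpr hx))]
        have hlt : l ∈ (insert l (r.map String.singleton).toFinset).erase "?" :=
          Finset.mem_erase.mpr ⟨hql, Finset.mem_insert_self _ _⟩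
        have hpeel1 := (Finset.add_sum_erase _
          (fun x => (((l :: r.map String.singleton).count x : ℕ) - p.count x)) hlt).symm
        have hpeel2 := (Finset.add_sum_erase _
          (fun x => (((r.map String.singleton).count x : ℕ) - (p.erase "?").count x)) hlt).symm
        have hrest : ∑ x ∈ ((insert l (r.map String.singleton).toFinset).erase "?").erase l,
              (((l :: r.map String.singleton).count x : ℕ) - p.count x)
            = ∑ x ∈ ((insert l (r.map String.singleton).toFinset).erase "?").erase l,
              ((r.map String.singleton).count x - (p.erase "?").count x) := by
          refine Finset.sum_congr rfl (fun x hx => ?_)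
          have hxl : x ≠ l := (Finset.mem_erase.mp hx).1
          have hxq : x ≠ "?" := (Finset.mem_erase.mp (Finset.mem_of_mem_erase hx)).1
          rw [pvCount_cons_ne _ (Ne.symm hxl), List.count_erase_of_ne hxq]
        have hc0 : p.count l = 0 := List.count_eq_zero.mpr hmem
        have hc0' : (p.erase "?").count l = 0 := by
          rw [List.count_erase_of_ne hql]; exact hc0
        have hc1 : (l :: r.map String.singleton).count l
            = (r.map String.singleton).count l + 1 := List.count_cons_self
        have hc2 : (p.erase "?").count "?" = p.count "?" - 1 := List.count_erase_self
        have hc3 : 1 ≤ p.count "?" := List.count_pos_iff.mpr hj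
        have hc4 : (l :: r.map String.singleton).count "?"
            = (r.map String.singleton).count "?" := pvCount_cons_ne _ hql
        rw [hpeel1, hpeel2, hrest, hc0, hc0', hc1, hc2, hc4]
        omega
      · rw [if_neg hmem, if_neg hj]
        simp only [Bool.false_eq_true, false_iff, not_le]
        unfold pvSD
        have hq0 : p.count "?" = 0 := List.count_eq_zero.mpr hj
        rw [hq0]
        by_cases hql : l = "?"
        · subst hql
          have h1 : 1 ≤ ("?" :: r.map String.singleton).count "?" := by
            rw [List.count_cons_self]; omega
          omega
        · have hlt : l ∈ ((l :: r.map String.singleton).toFinset).erase "?" := by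
            rw [List.toFinset_cons]
            exact Finset.mem_erase.mpr ⟨hql, Finset.mem_insert_self _ _⟩
          have hpeel := (Finset.add_sum_erase _
            (fun x => (((l :: r.map String.singleton).count x : ℕ) - p.count x)) hlt).symm
          have hc0 : p.count l = 0 := List.count_eq_zero.mpr hmem
          have hc1 : (l :: r.map String.singleton).count l
              = (r.map String.singleton).count l + 1 := List.count_cons_self
          rw [hpeel, hc0, hc1]
          omega

-- a playable word is no longer than the pool
lemma pvSD_length (s p : List String) (h : pvSD s p ≤ p.count "?") : s.length ≤ p.length := by
  have hlen : ∑ x ∈ s.toFinset, s.count x = s.length := List.sum_toFinset_count_eq_length s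
  have h1 : s.length = s.count "?" + ∑ x ∈ s.toFinset.erase "?", s.count x := by
    by_cases hq : "?" ∈ s.toFinset
    · rw [← hlen, ← Finset.add_sum_erase _ _ hq]
    · have hz : s.count "?" = 0 :=
        List.count_eq_zero.mpr (fun h' => hq (List.mem_toFinset.mpr h'))
      rw [← hlen, Finset.erase_eq_of_notMem hq, hz]
      omega
  have h2 : ∑ x ∈ s.toFinset.erase "?", s.count x
      ≤ (∑ x ∈ s.toFinset.erase "?", p.count x)
        + ∑ x ∈ s.toFinset.erase "?", (s.count x - p.count x) := by
    rw [← Finset.sum_add_distrib]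
    exact Finset.sum_le_sum (fun x _ => by omega)
  have h3 : p.count "?" + ∑ x ∈ s.toFinset.erase "?", p.count x ≤ p.length := by
    have := pvCountSum_le (insert "?" (s.toFinset.erase "?")) p
    rwa [Finset.sum_insert (Finset.notMem_erase _ _)] at this
  unfold pvSD at h
  omega

-- B's deficit expression computes pvSD
lemma pvDeficit_eq (mot : String) (pool : List String) :
    pvB_deficit mot pool = pvSD (mot.toList.map String.singleton) pool := by
  simp only [pvB_deficit, pvSD]
  set s := mot.toList.map String.singleton with hs
  congr 1
  have hnd : ((PySem.List.dedup s).filter (fun c => c ≠ "?")).Nodup :=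
    List.Nodup.filter _ (PySem.List.nodup_dedup s)
  have htf : ((PySem.List.dedup s).filter (fun c => c ≠ "?")).toFinset
      = s.toFinset.erase "?" := by
    ext x
    simp only [List.mem_toFinset, List.mem_filter, PySem.List.mem_dedup,
      Finset.mem_erase, decide_eq_true_eq]
    tauto
  rw [← List.sum_toFinset _ hnd, htf]

-- the two candidacy tests agree
lemma pvCand_iff (mot : String) (pool : List String) :
    ((PySem.Str.len mot ≤ (pool.length : Int)) ∧ pvA_mot_jouable mot pool = true)
      ↔ pvB_deficit mot pool ≤ pool.count "?" := by
  rw [pvDeficit_eq]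
  unfold pvA_mot_jouable
  rw [pvGreedy_iff]
  constructor
  · exact fun h => h.2
  · intro h
    refine ⟨?_, h⟩
    have hlen := pvSD_length _ _ h
    rw [List.length_map] at hlen
    have : mot.toList.length = mot.length := by simp
    simp [PySem.Str.len_eq]
    omega

-- folding an Int sum
lemma pvFoldAdd (l : List Char) (g : Char → Int) : ∀ i : Int,
    l.foldl (fun a c => a + g c) i = i + (l.map g).sum := by
  induction l with
  | nil => intro i; simp
  | cons c r ih => intro i; simp [ih]; ring

-- the two word values agree
lemma pvVal_eq (mot : String) (dico : List (String × List (String × Int))) :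
    pvA_valeur_mot mot dico = pvB_valeur mot dico := by
  unfold pvA_valeur_mot pvB_valeur
  rw [pvFoldAdd]
  split_ifs <;> ring

-- A's playable-list construction is a filter by B's test
lemma pvJouables_eq (pool : List String) : ∀ (motsfr : List String) (acc : List String),
    motsfr.foldl (fun playable mot =>
      if PySem.Str.len mot ≤ (pool.length : Int) then
        if pvA_mot_jouable mot pool then playable ++ [mot] else playable
      else playable) acc
    = acc ++ motsfr.filter (fun mot => decide (pvB_deficit mot pool ≤ pool.count "?")) := by
  intro motsfr
  induction motsfr with
  | nil => intro acc; simp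
  | cons x xs ih =>
    intro acc
    simp only [List.foldl_cons, List.filter_cons]
    by_cases hx : pvB_deficit x pool ≤ pool.count "?"
    · obtain ⟨h1, h2⟩ := (pvCand_iff x pool).mpr hx
      rw [if_pos h1, if_pos h2, ih]
      simp [hx]
    · have hcoll : (if PySem.Str.len x ≤ (pool.length : Int) then
          if pvA_mot_jouable x pool then acc ++ [x] else acc else acc) = acc := by
        split_ifs with h1 h2
        · exact absurd ((pvCand_iff x pool).mp ⟨h1, h2⟩) hx
        · rfl
        · rfl
      rw [hcoll, ih]
      simp [hx]

-- B's fused fold, once a score is present, is A's scan over the remaining candidates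
lemma pvFold_some (dico : List (String × List (String × Int))) (pool : List String)
    (jokers : Nat) : ∀ (xs : List String) (b : String) (sc : Int),
    xs.foldl (fun st mot =>
        if pvB_deficit mot pool ≤ jokers then
          let s := pvB_valeur mot dico
          match st.2 with
          | none => (mot, some s)
          | some bq => if s > bq then (mot, some s) else st
        else st) (b, some sc)
    = (let r := (xs.filter (fun mot => decide (pvB_deficit mot pool ≤ jokers))).foldl
          (fun bs mot => let s := pvA_valeur_mot mot dico;
            if s > bs.2 then (mot, s) else bs) (b, sc);
       (r.1, some r.2)) := by
  intro xs
  induction xs with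
  | nil => intro b sc; rfl
  | cons x xs ih =>
    intro b sc
    by_cases hx : pvB_deficit x pool ≤ jokers
    · simp only [List.foldl_cons, List.filter_cons, decide_eq_true hx, if_true, if_pos hx]
      rw [pvVal_eq x dico]
      by_cases hgt : pvB_valeur x dico > sc
      · rw [if_pos hgt, if_pos hgt]; exact ih x (pvB_valeur x dico)
      · rw [if_neg hgt, if_neg hgt]; exact ih b sc
    · simp only [List.foldl_cons, List.filter_cons, decide_eq_false hx,
        Bool.false_eq_true, if_false, if_neg hx]
      exact ih b sc

-- B's fused fold from the empty state is A's head-initialised scan of the candidates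
lemma pvFold_none (dico : List (String × List (String × Int))) (pool : List String)
    (jokers : Nat) : ∀ (xs : List String),
    xs.foldl (fun st mot =>
        if pvB_deficit mot pool ≤ jokers then
          let s := pvB_valeur mot dico
          match st.2 with
          | none => (mot, some s)
          | some bq => if s > bq then (mot, some s) else st
        else st) (("", (none : Option Int)))
    = (match xs.filter (fun mot => decide (pvB_deficit mot pool ≤ jokers)) with
       | [] => (("" : String), (none : Option Int))
       | h :: t =>
         (let r := t.foldl (fun bs mot => let s := pvA_valeur_mot mot dico;
            if s > bs.2 then (mot, s) else bs) (h, pvA_valeur_mot h dico);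
          (r.1, some r.2))) := by
  intro xs
  induction xs with
  | nil => rfl
  | cons x xs ih =>
    by_cases hx : pvB_deficit x pool ≤ jokers
    · simp only [List.foldl_cons, List.filter_cons, decide_eq_true hx, if_true, if_pos hx]
      rw [pvFold_some dico pool jokers xs x (pvB_valeur x dico), ← pvVal_eq x dico]
    · simp only [List.foldl_cons, List.filter_cons, decide_eq_false hx,
        Bool.false_eq_true, if_false, if_neg hx]
      exact ih

-- ===== VERDICT (by name: the statement is the Claim_ definition above) =====
theorem meilleur_mot_spec : Claim_equal_meilleur_mot := by
  intro motsfr ll dico extra_lett _hdom _hpre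
  simp only [Spec_meilleur_mot, meilleur_mot, meilleur_mot_alt, pvA_mots_jouables]
  rw [pvFold_none, pvJouables_eq]
  simp only [List.nil_append]
  clear _hdom _hpre
  cases h : motsfr.filter (fun mot =>
      decide (pvB_deficit mot (ll ++ (match extra_lett with | none => [] | some e => e))
        ≤ (ll ++ (match extra_lett with | none => [] | some e => e)).count "?")) with
  | nil => rfl
  | cons hd tl => rfl
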